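-- pv_equiv track=rewrite | github.com/junyeon1997/Algorithm-source-code-python | programmers/Main7.py | solution
-- ===== SOURCE A (Python) =====
-- def solution(n):
--     answer = []
--     tri=[[0 for i in range(0, j)] for j in range(1, n+1)]
--     x=-1
--     y=0
--     num=1
--     for a in range(0, n):
--         for b in range(a, n):
--             if a%3==0:
--                 x+=1
--             elif a%3==1:
--                 y+=1
--             else:
--                 x-=1
--                 y-=1
--             tri[x][y]=num
--             num+=1
--     answer = sum(tri, [])
--     return answer
-- ===== SOURCE B (Python) =====
-- def solution(n):
--     # Closed form: each cell's value is computed directly from its coordinates.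
--     # Layer L = min(y, x - y, n - 1 - x) is how deep the cell sits in the spiral;
--     # the layer-L sub-triangle has side m = n - 3*L and starts after
--     # base = (n*(n+1) - m*(m+1)) // 2 numbers; within it the cell is on the left
--     # edge, the bottom row or the diagonal, each a simple arithmetic progression.
--     def val(x, y):
--         L = min(y, x - y, n - 1 - x)
--         m = n - 3 * L
--         base = (n * (n + 1) - m * (m + 1)) // 2
--         xl, yl = x - 2 * L, y - L
--         if yl == 0:
--             return base + xl + 1
--         if xl == m - 1:
--             return base + m + yl
--         return base + 3 * m - 2 - xl
--
--     return [val(x, y) for x in range(n) for y in range(x + 1)]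
-- ===== Notes on version B (the rewrite author's own statement) =====
-- stated objective: faster
-- what changed: B replaces A's stateful spiral walk (nested loops mutating a jagged array, flattened by quadratic sum(tri, [])) with a closed-form formula: each cell's value is computed in O(1) directly from its coordinates via its spiral layer L = min(y, x-y, n-1-x), and the flat result is emitted by a single comprehension.
import Mathlib
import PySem

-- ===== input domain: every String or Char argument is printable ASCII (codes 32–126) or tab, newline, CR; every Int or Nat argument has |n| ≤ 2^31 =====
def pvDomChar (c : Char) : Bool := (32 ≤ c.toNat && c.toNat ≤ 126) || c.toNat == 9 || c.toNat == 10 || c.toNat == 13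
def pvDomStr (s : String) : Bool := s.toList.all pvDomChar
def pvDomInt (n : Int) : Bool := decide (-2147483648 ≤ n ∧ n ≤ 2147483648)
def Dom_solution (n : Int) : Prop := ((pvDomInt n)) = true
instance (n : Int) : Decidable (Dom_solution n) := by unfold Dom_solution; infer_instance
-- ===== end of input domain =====

-- B computes each cell of the snake-filled triangle by a closed-form formula from its
-- coordinates (spiral layer L = min(y, x-y, n-1-x)) instead of A's stateful spiral walk
-- over a jagged array flattened by repeated concatenation; a timing run measured B faster.

-- ===== PORT A =====
-- body of A's inner loop 'for b in range(a, n)' (b is unused by the body)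
def aInner (a : Int) (st : List (List Int) × Int × Int × Int) (_b : Int) :
    List (List Int) × Int × Int × Int :=
  let (tri, x, y, num) := st
  let (x, y) :=
    if PySem.Int.mod a 3 = 0 then (x + 1, y)
    else if PySem.Int.mod a 3 = 1 then (x, y + 1)
    else (x - 1, y - 1)
  -- tri[x][y] = num  (indices are always in range when the Python executes this line)
  (PySem.List.pySetD tri x (PySem.List.pySetD (PySem.List.pyGetD tri x []) y num), x, y, num + 1)

def solution (n : Int) : List Int :=
  let tri : List (List Int) :=
    (PySem.List.pyRange 1 (n + 1) 1).map (fun j => (PySem.List.pyRange 0 j 1).map (fun _ => (0 : Int)))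
  let s := (PySem.List.pyRange 0 n 1).foldl
    (fun st a => (PySem.List.pyRange a n 1).foldl (aInner a) st) (tri, -1, 0, 1)
  s.1.flatten

-- ===== PORT B =====
-- Source B's helper val(x, y): the closed-form value of cell (x, y)
def valB (n x y : Int) : Int :=
  let L := min y (min (x - y) (n - 1 - x))
  let m := n - 3 * L
  let base := PySem.Int.floordiv (n * (n + 1) - m * (m + 1)) 2
  let xl := x - 2 * L
  let yl := y - L
  if yl = 0 then base + xl + 1
  else if xl = m - 1 then base + m + yl
  else base + 3 * m - 2 - xl

def solution_alt (n : Int) : List Int :=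
  (PySem.List.pyRange 0 n 1).flatMap
    (fun x => (PySem.List.pyRange 0 (x + 1) 1).map (fun y => valB n x y))

-- ===== PRECONDITION & SPEC =====
def Spec_solution (n : Int) (out : List Int) : Prop := out = solution_alt n
instance (n : Int) (out : List Int) : Decidable (Spec_solution n out) := by unfold Spec_solution; infer_instance

-- ===== CLAIM (what is proved, stated in full; the proofs are below) =====
def Claim_equal_solution : Prop := ∀ (n : Int), Dom_solution n → Spec_solution n (solution n)

-- ===== LEMMAS AND PROOFS =====

-- direction of leg number a (A's mod-3 branch)
def dirOf (a : Int) : Int × Int :=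
  if PySem.Int.mod a 3 = 0 then (1, 0) else if PySem.Int.mod a 3 = 1 then (0, 1) else (-1, -1)

-- the positions visited by one leg of length L starting (exclusively) at p with direction d
def legPos (p d : Int × Int) : Nat → List (Int × Int)
  | 0 => []
  | L + 1 => (p.1 + d.1, p.2 + d.2) :: legPos (p.1 + d.1, p.2 + d.2) d L

-- positions of the whole spiral: m legs of lengths m, m-1, ..., 1, leg numbers a, a+1, ...
def spiral : Nat → Int → Int × Int → List (Int × Int)
  | 0, _, _ => []
  | m + 1, a, p =>
      legPos p (dirOf a) (m + 1) ++
      spiral m (a + 1) (p.1 + (m + 1 : Nat) * (dirOf a).1, p.2 + (m + 1 : Nat) * (dirOf a).2)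

-- end position of the spiral walk
def spiralEnd : Nat → Int → Int × Int → Int × Int
  | 0, _, p => p
  | m + 1, a, p =>
      spiralEnd m (a + 1) (p.1 + (m + 1 : Nat) * (dirOf a).1, p.2 + (m + 1 : Nat) * (dirOf a).2)

-- A's write, as a step over (tri, num) and a position
def wN (s : List (List Int) × Int) (q : Int × Int) : List (List Int) × Int :=
  (PySem.List.pySetD s.1 q.1 (PySem.List.pySetD (PySem.List.pyGetD s.1 q.1 []) q.2 s.2), s.2 + 1)

-- entry (i, j) of a jagged array
def ent (T : List (List Int)) (i j : Nat) : Int := (T.getD i []).getD j 0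

-- the A-branch chain is a step by dirOf
theorem dirStep (a x y : Int) :
    (if PySem.Int.mod a 3 = 0 then (x + 1, y)
     else if PySem.Int.mod a 3 = 1 then (x, y + 1)
     else (x - 1, y - 1)) = (x + (dirOf a).1, y + (dirOf a).2) := by
  unfold dirOf; split_ifs <;> simp [Int.sub_eq_add_neg]

theorem dirOf_add_three (a : Int) : dirOf (a + 3) = dirOf a := by
  have h : PySem.Int.mod (a + 3) 3 = PySem.Int.mod a 3 := by
    rw [PySem.Int.mod_eq_emod_of_pos (by omega), PySem.Int.mod_eq_emod_of_pos (by omega)]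
    omega
  unfold dirOf
  rw [h]

theorem legPos_translate (p d v : Int × Int) (L : Nat) :
    legPos (p.1 + v.1, p.2 + v.2) d L = (legPos p d L).map (fun q => (q.1 + v.1, q.2 + v.2)) := by
  induction L generalizing p with
  | zero => rfl
  | succ L ih =>
      simp only [legPos, List.map_cons]
      have := ih (p.1 + d.1, p.2 + d.2)
      simp only at this
      rw [show p.1 + v.1 + d.1 = p.1 + d.1 + v.1 by ring, show p.2 + v.2 + d.2 = p.2 + d.2 + v.2 by ring, this]

theorem mem_legPos (q p d : Int × Int) (L : Nat) :
    q ∈ legPos p d L ↔ ∃ i : Nat, i < L ∧ q = (p.1 + (i + 1 : Nat) * d.1, p.2 + (i + 1 : Nat) * d.2) := by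
  induction L generalizing p with
  | zero => simp [legPos]
  | succ L ih =>
      simp only [legPos, List.mem_cons, ih (p.1 + d.1, p.2 + d.2)]
      constructor
      · rintro (rfl | ⟨i, hi, rfl⟩)
        · exact ⟨0, by omega, by simp only [Prod.mk.injEq]; push_cast; exact ⟨by ring, by ring⟩⟩
        · exact ⟨i + 1, by omega, by simp only [Prod.mk.injEq]; push_cast; exact ⟨by ring, by ring⟩⟩
      · rintro ⟨i, hi, rfl⟩
        match i with
        | 0 => left; simp only [Prod.mk.injEq]; push_cast; exact ⟨by ring, by ring⟩
        | i + 1 =>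
            right
            exact ⟨i, by omega, by simp only [Prod.mk.injEq]; push_cast; exact ⟨by ring, by ring⟩⟩

theorem legPos_length (p d : Int × Int) (L : Nat) : (legPos p d L).length = L := by
  induction L generalizing p with
  | zero => rfl
  | succ L ih => simp [legPos, ih]

theorem legPos_getElem? (L : Nat) (p d : Int × Int) (k : Nat) (hk : k < L) :
    (legPos p d L)[k]? = some (p.1 + ((k : Int) + 1) * d.1, p.2 + ((k : Int) + 1) * d.2) := by
  induction L generalizing p k with
  | zero => omega
  | succ L ih =>
      match k with
      | 0 => simp [legPos]
      | k + 1 =>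
          simp only [legPos, List.getElem?_cons_succ]
          rw [ih (p.1 + d.1, p.2 + d.2) k (by omega)]
          simp only [Option.some.injEq, Prod.mk.injEq]
          push_cast
          constructor <;> ring

theorem legPos_nodup (p d : Int × Int) (L : Nat) (hd : d.1 ≠ 0 ∨ d.2 ≠ 0) :
    (legPos p d L).Nodup := by
  induction L generalizing p with
  | zero => exact List.nodup_nil
  | succ L ih =>
      rw [legPos, List.nodup_cons]
      refine ⟨?_, ih _⟩
      rw [mem_legPos]
      rintro ⟨i, _, h⟩
      simp only [Prod.mk.injEq] at h
      obtain ⟨h1, h2⟩ := h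
      have hi1 : ((i + 1 : Nat) : Int) ≠ 0 := by push_cast; omega
      rcases hd with hd | hd
      · have hz : ((i + 1 : Nat) : Int) * d.1 = 0 := by linarith
        rcases mul_eq_zero.mp hz with h | h
        · exact hi1 h
        · exact hd h
      · have hz : ((i + 1 : Nat) : Int) * d.2 = 0 := by linarith
        rcases mul_eq_zero.mp hz with h | h
        · exact hi1 h
        · exact hd h

theorem spiral_translate (m : Nat) : ∀ (a : Int) (p v : Int × Int),
    spiral m a (p.1 + v.1, p.2 + v.2) = (spiral m a p).map (fun q => (q.1 + v.1, q.2 + v.2)) := by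
  induction m with
  | zero => intro a p v; rfl
  | succ m ih =>
      intro a p v
      simp only [spiral, List.map_append]
      rw [legPos_translate p (dirOf a) v (m + 1)]
      have := ih (a + 1) (p.1 + (m + 1 : Nat) * (dirOf a).1, p.2 + (m + 1 : Nat) * (dirOf a).2) v
      simp only at this
      rw [show p.1 + v.1 + (m + 1 : Nat) * (dirOf a).1 = p.1 + (m + 1 : Nat) * (dirOf a).1 + v.1 by ring,
            show p.2 + v.2 + (m + 1 : Nat) * (dirOf a).2 = p.2 + (m + 1 : Nat) * (dirOf a).2 + v.2 by ring, this]

theorem spiral_shift (m : Nat) : ∀ (a : Int) (p : Int × Int), spiral m (a + 3) p = spiral m a p := by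
  induction m with
  | zero => intro a p; rfl
  | succ m ih =>
      intro a p
      simp only [spiral, dirOf_add_three]
      rw [show a + 3 + 1 = a + 1 + 3 by ring, ih (a + 1)]

-- the three outer legs plus the translated inner spiral
theorem spiral_decomp (m : Nat) :
    spiral (m + 3) 0 (-1, 0) =
      legPos (-1, 0) (1, 0) (m + 3) ++
        (legPos ((m : Int) + 2, 0) (0, 1) (m + 2) ++
          (legPos ((m : Int) + 2, (m : Int) + 2) (-1, -1) (m + 1) ++
            (spiral m 0 (-1, 0)).map (fun q => (q.1 + 2, q.2 + 1)))) := by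
  have d0 : dirOf 0 = ((1 : Int), (0 : Int)) := by decide
  have d1 : dirOf (0 + 1) = ((0 : Int), (1 : Int)) := by decide
  have d2 : dirOf (0 + 1 + 1) = ((-1 : Int), (-1 : Int)) := by decide
  show spiral (m + 2 + 1) 0 (-1, 0) = _
  simp only [spiral, d0, d1, d2]
  rw [show (0 : Int) + 1 + 1 + 1 = 0 + 3 by ring, spiral_shift]
  have htr := spiral_translate m 0 (-1, 0) (2, 1)
  norm_num at htr ⊢
  rw [show ((m : Int) + 1 + 1 : Int) = (m : Int) + 2 by ring,
      show ((m : Int) + 2 + (-1 + -(m : Int)) : Int) = 1 by ring, htr]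

-- the spiral starting at (-1, 0) stays inside the triangle of side m
theorem spiral_bounds (m : Nat) : ∀ q ∈ spiral m 0 (-1, 0), 0 ≤ q.2 ∧ q.2 ≤ q.1 ∧ q.1 < (m : Int) := by
  induction m using Nat.strong_induction_on with
  | _ m ih =>
    match m with
    | 0 => decide
    | 1 => decide
    | 2 => decide
    | m + 3 =>
      intro q hq
      rw [spiral_decomp] at hq
      simp only [List.mem_append] at hq
      rcases hq with hq | hq | hq | hq
      · rw [mem_legPos] at hq
        obtain ⟨i, hi, rfl⟩ := hq
        push_cast
        refine ⟨by omega, by omega, by omega⟩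
      · rw [mem_legPos] at hq
        obtain ⟨i, hi, rfl⟩ := hq
        push_cast
        refine ⟨by omega, by omega, by omega⟩
      · rw [mem_legPos] at hq
        obtain ⟨i, hi, rfl⟩ := hq
        push_cast
        refine ⟨by omega, by omega, by omega⟩
      · rw [List.mem_map] at hq
        obtain ⟨q', hq', rfl⟩ := hq
        have := ih m (by omega) q' hq'
        push_cast
        refine ⟨by omega, by omega, by omega⟩

-- coordinate bounds for the four pieces of the decomposition
theorem mem_leg1 (m : Nat) (q : Int × Int) (h : q ∈ legPos (-1, 0) (1, 0) (m + 3)) :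
    q.2 = 0 ∧ 0 ≤ q.1 ∧ q.1 ≤ (m : Int) + 2 := by
  rw [mem_legPos] at h
  obtain ⟨i, hi, rfl⟩ := h
  push_cast
  refine ⟨by omega, by omega, by omega⟩

theorem mem_leg2 (m : Nat) (q : Int × Int) (h : q ∈ legPos ((m : Int) + 2, 0) (0, 1) (m + 2)) :
    q.1 = (m : Int) + 2 ∧ 1 ≤ q.2 ∧ q.2 ≤ (m : Int) + 2 := by
  rw [mem_legPos] at h
  obtain ⟨i, hi, rfl⟩ := h
  push_cast
  refine ⟨by omega, by omega, by omega⟩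

theorem mem_leg3 (m : Nat) (q : Int × Int)
    (h : q ∈ legPos ((m : Int) + 2, (m : Int) + 2) (-1, -1) (m + 1)) :
    q.1 = q.2 ∧ 1 ≤ q.1 ∧ q.1 ≤ (m : Int) + 1 := by
  rw [mem_legPos] at h
  obtain ⟨i, hi, rfl⟩ := h
  push_cast
  refine ⟨by omega, by omega, by omega⟩

theorem mem_inner (m : Nat) (q : Int × Int)
    (h : q ∈ (spiral m 0 (-1, 0)).map (fun q => (q.1 + 2, q.2 + 1))) :
    1 ≤ q.2 ∧ q.2 + 1 ≤ q.1 ∧ q.1 ≤ (m : Int) + 1 := by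
  rw [List.mem_map] at h
  obtain ⟨p, hp, rfl⟩ := h
  have := spiral_bounds m p hp
  push_cast
  refine ⟨by omega, by omega, by omega⟩

theorem spiral_nodup (N : Nat) : (spiral N 0 (-1, 0)).Nodup := by
  induction N using Nat.strong_induction_on with
  | _ N ih =>
    match N with
    | 0 => decide
    | 1 => decide
    | 2 => decide
    | m + 3 =>
      rw [spiral_decomp]
      have hinj : Function.Injective (fun q : Int × Int => (q.1 + 2, q.2 + 1)) := by
        intro a b hab
        rw [Prod.ext_iff] at hab ⊢
        simp only at hab
        exact ⟨by omega, by omega⟩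
      rw [List.nodup_append]
      refine ⟨legPos_nodup _ _ _ (Or.inl (by decide)), ?_, ?_⟩
      · rw [List.nodup_append]
        refine ⟨legPos_nodup _ _ _ (Or.inr (by decide)), ?_, ?_⟩
        · rw [List.nodup_append]
          refine ⟨legPos_nodup _ _ _ (Or.inl (by decide)),
            List.Nodup.map hinj (ih m (by omega)), ?_⟩
          intro a ha b hb heq
          have h3 := mem_leg3 m a ha
          have h4 := mem_inner m b hb
          rw [heq] at h3
          omega
        · intro a ha b hb heq
          have h2 := mem_leg2 m a ha
          rw [heq] at h2
          rcases List.mem_append.mp hb with hb | hb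
          · have h3 := mem_leg3 m b hb
            omega
          · have h4 := mem_inner m b hb
            omega
      · intro a ha b hb heq
        have h1 := mem_leg1 m a ha
        rw [heq] at h1
        rcases List.mem_append.mp hb with hb | hb
        · have h2 := mem_leg2 m b hb
          omega
        rcases List.mem_append.mp hb with hb | hb
        · have h3 := mem_leg3 m b hb
          omega
        · have h4 := mem_inner m b hb
          omega

theorem fdiv_two_even (k : Int) : PySem.Int.floordiv (2 * k) 2 = k := by
  rw [PySem.Int.floordiv_eq_ediv_of_pos (by norm_num)]
  omega

-- the closed form on the four regions of the triangle
theorem valB_left (n x : Int) (h0 : 0 ≤ x) (h1 : x < n) : valB n x 0 = x + 1 := by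
  simp only [valB]
  rw [show min (0 : Int) (min (x - 0) (n - 1 - x)) = 0 by omega]
  rw [show n * (n + 1) - (n - 3 * 0) * (n - 3 * 0 + 1) = 2 * 0 by ring, fdiv_two_even]
  rw [if_pos (by ring : (0 : Int) - 0 = 0)]
  ring

theorem valB_bottom (n y : Int) (h1 : 1 ≤ y) (h2 : y ≤ n - 1) : valB n (n - 1) y = n + y := by
  simp only [valB]
  rw [show min y (min (n - 1 - y) (n - 1 - (n - 1))) = 0 by omega]
  rw [show n * (n + 1) - (n - 3 * 0) * (n - 3 * 0 + 1) = 2 * 0 by ring, fdiv_two_even]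
  rw [if_neg (by omega : ¬ (y - 0 = 0))]
  rw [if_pos (by ring : n - 1 - 2 * 0 = n - 3 * 0 - 1)]
  ring

theorem valB_diag (n x : Int) (h1 : 1 ≤ x) (h2 : x ≤ n - 2) : valB n x x = 3 * n - 2 - x := by
  simp only [valB]
  rw [show min x (min (x - x) (n - 1 - x)) = 0 by omega]
  rw [show n * (n + 1) - (n - 3 * 0) * (n - 3 * 0 + 1) = 2 * 0 by ring, fdiv_two_even]
  rw [if_neg (by omega : ¬ (x - 0 = 0))]
  rw [if_neg (by omega : ¬ (x - 2 * 0 = n - 3 * 0 - 1))]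
  ring

theorem valB_inner (n x y : Int) (h1 : 1 ≤ y) (h2 : y + 1 ≤ x) (h3 : x ≤ n - 2) :
    valB n x y = 3 * n - 3 + valB (n - 3) (x - 2) (y - 1) := by
  simp only [valB]
  set L := min y (min (x - y) (n - 1 - x)) with hLdef
  have hL1 : 1 ≤ L := by omega
  rw [show min (y - 1) (min (x - 2 - (y - 1)) (n - 3 - 1 - (x - 2))) = L - 1 by omega]
  rw [show n - 3 - 3 * (L - 1) = n - 3 * L by ring]
  obtain ⟨a, ha⟩ := Int.even_mul_succ_self n
  obtain ⟨b, hb⟩ := Int.even_mul_succ_self (n - 3 * L)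
  obtain ⟨c, hc⟩ := Int.even_mul_succ_self (n - 3)
  have hb1 : PySem.Int.floordiv (n * (n + 1) - (n - 3 * L) * (n - 3 * L + 1)) 2 = a - b := by
    rw [show n * (n + 1) - (n - 3 * L) * (n - 3 * L + 1) = 2 * (a - b) by rw [ha, hb]; ring]
    exact fdiv_two_even _
  have hb2 : PySem.Int.floordiv ((n - 3) * (n - 3 + 1) - (n - 3 * L) * (n - 3 * L + 1)) 2 = c - b := by
    rw [show (n - 3) * (n - 3 + 1) - (n - 3 * L) * (n - 3 * L + 1) = 2 * (c - b) by rw [hc, hb]; ring]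
    exact fdiv_two_even _
  rw [hb1, hb2]
  have hac : a - c = 3 * n - 3 := by
    have h6 : a + a - (c + c) = 6 * n - 6 := by rw [← ha, ← hc]; ring
    omega
  split_ifs <;> omega

-- the cell (x, y) sits at spiral index valB n x y - 1
theorem spiral_idx (N : Nat) : ∀ x y : Int, 0 ≤ y → y ≤ x → x < (N : Int) →
    ∃ k : Nat, (k : Int) = valB (N : Int) x y - 1 ∧ (spiral N 0 (-1, 0))[k]? = some (x, y) := by
  induction N using Nat.strong_induction_on with
  | _ N ih =>
    match N with
    | 0 =>
        intro x y h1 h2 h3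
        norm_num at h3
        omega
    | 1 =>
        intro x y h1 h2 h3
        obtain ⟨rfl, rfl⟩ : x = 0 ∧ y = 0 := by norm_num at h3; omega
        exact ⟨0, by decide, by decide⟩
    | 2 =>
        intro x y h1 h2 h3
        have h3' : x < 2 := by exact_mod_cast h3
        rcases (by omega : (x = 0 ∧ y = 0) ∨ (x = 1 ∧ y = 0) ∨ (x = 1 ∧ y = 1)) with
          ⟨rfl, rfl⟩ | ⟨rfl, rfl⟩ | ⟨rfl, rfl⟩
        · exact ⟨0, by decide, by decide⟩
        · exact ⟨1, by decide, by decide⟩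
        · exact ⟨2, by decide, by decide⟩
    | m + 3 =>
        intro x y h1 h2 h3
        rw [spiral_decomp]
        have hl1 : (legPos (-1, 0) (1, 0) (m + 3)).length = m + 3 := legPos_length ..
        have hl2 : (legPos ((m : Int) + 2, 0) (0, 1) (m + 2)).length = m + 2 := legPos_length ..
        have hl3 : (legPos ((m : Int) + 2, (m : Int) + 2) (-1, -1) (m + 1)).length = m + 1 :=
          legPos_length ..
        rcases (by omega : y = 0 ∨ (1 ≤ y ∧ x = (m : Int) + 2) ∨
            (1 ≤ y ∧ x ≤ (m : Int) + 1 ∧ x = y) ∨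
            (1 ≤ y ∧ y + 1 ≤ x ∧ x ≤ (m : Int) + 1)) with
          hc | ⟨hc1, hc2⟩ | ⟨hc1, hc2, hc3⟩ | ⟨hc1, hc2, hc3⟩
        · -- left column
          subst hc
          refine ⟨x.toNat, ?_, ?_⟩
          · rw [valB_left _ _ h2 h3]
            omega
          · rw [List.getElem?_append_left (by rw [hl1]; omega)]
            rw [legPos_getElem? (m + 3) _ _ x.toNat (by omega)]
            simp only [Option.some.injEq, Prod.mk.injEq]
            constructor <;> omega
        · -- bottom row
          subst hc2
          refine ⟨m + 3 + (y.toNat - 1), ?_, ?_⟩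
          · rw [show ((m : Int) + 2) = ((m + 3 : Nat) : Int) - 1 by push_cast; ring]
            rw [valB_bottom _ _ hc1 (by push_cast; omega)]
            push_cast
            omega
          · rw [List.getElem?_append_right (by rw [hl1]; omega), hl1,
                show m + 3 + (y.toNat - 1) - (m + 3) = y.toNat - 1 by omega]
            rw [List.getElem?_append_left (by rw [hl2]; omega)]
            rw [legPos_getElem? (m + 2) _ _ (y.toNat - 1) (by omega)]
            simp only [Option.some.injEq, Prod.mk.injEq]
            constructor <;> omega
        · -- diagonal
          subst hc3
          refine ⟨2 * m + 5 + (m + 1 - x.toNat), ?_, ?_⟩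
          · rw [valB_diag _ _ hc1 (by push_cast; omega)]
            push_cast
            omega
          · rw [List.getElem?_append_right (by rw [hl1]; omega), hl1,
                show 2 * m + 5 + (m + 1 - x.toNat) - (m + 3) = m + 2 + (m + 1 - x.toNat) by omega]
            rw [List.getElem?_append_right (by rw [hl2]; omega), hl2,
                show m + 2 + (m + 1 - x.toNat) - (m + 2) = m + 1 - x.toNat by omega]
            rw [List.getElem?_append_left (by rw [hl3]; omega)]
            rw [legPos_getElem? (m + 1) _ _ (m + 1 - x.toNat) (by omega)]
            simp only [Option.some.injEq, Prod.mk.injEq]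
            constructor <;> omega
        · -- inner triangle
          obtain ⟨k', hk', hg'⟩ := ih m (by omega) (x - 2) (y - 1) (by omega) (by omega) (by omega)
          refine ⟨3 * m + 6 + k', ?_, ?_⟩
          · rw [valB_inner _ _ _ hc1 hc2 (by push_cast; omega)]
            rw [show ((m + 3 : Nat) : Int) - 3 = (m : Int) by push_cast; ring]
            push_cast
            omega
          · rw [List.getElem?_append_right (by rw [hl1]; omega), hl1,
                show 3 * m + 6 + k' - (m + 3) = m + 2 + (m + 1 + k') by omega]
            rw [List.getElem?_append_right (by rw [hl2]; omega), hl2,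
                show m + 2 + (m + 1 + k') - (m + 2) = m + 1 + k' by omega]
            rw [List.getElem?_append_right (by rw [hl3]; omega), hl3,
                show m + 1 + k' - (m + 1) = k' by omega]
            rw [List.getElem?_map, hg']
            simp only [Option.map_some, Option.some.injEq, Prod.mk.injEq]
            constructor <;> omega

-- A's inner loop over a length-L list writes one leg
theorem A_leg : ∀ (L : Nat) (l : List Int), l.length = L → ∀ (a : Int) (tri : List (List Int)) (x y num : Int),
    l.foldl (aInner a) (tri, x, y, num) =
      (((legPos (x, y) (dirOf a) L).foldl wN (tri, num)).1,
        x + (L : Nat) * (dirOf a).1, y + (L : Nat) * (dirOf a).2,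
        ((legPos (x, y) (dirOf a) L).foldl wN (tri, num)).2) := by
  intro L
  induction L with
  | zero =>
      intro l hl a tri x y num
      rw [List.length_eq_zero_iff] at hl
      subst hl
      simp [legPos]
  | succ L ih =>
      intro l hl a tri x y num
      match l with
      | h :: t =>
          simp only [List.length_cons] at hl
          simp only [List.foldl_cons]
          rw [show aInner a (tri, x, y, num) h =
              (PySem.List.pySetD tri (x + (dirOf a).1)
                 (PySem.List.pySetD (PySem.List.pyGetD tri (x + (dirOf a).1) []) (y + (dirOf a).2) num),
               x + (dirOf a).1, y + (dirOf a).2, num + 1) by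
            simp only [aInner]
            rw [dirStep a x y]]
          rw [ih t (by omega) a _ (x + (dirOf a).1) (y + (dirOf a).2) (num + 1)]
          simp only [legPos, List.foldl_cons, wN]
          refine congrArg₂ _ rfl (congrArg₂ _ ?_ (congrArg₂ _ ?_ rfl)) <;> push_cast <;> ring

-- A's outer loop walks the whole spiral
theorem A_outer (n : Int) : ∀ (m : Nat) (a : Int) (tri : List (List Int)) (x y num : Int), a + m = n →
    (PySem.List.pyRange a n 1).foldl
        (fun st a' => (PySem.List.pyRange a' n 1).foldl (aInner a') st) (tri, x, y, num) =
      (((spiral m a (x, y)).foldl wN (tri, num)).1,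
        (spiralEnd m a (x, y)).1, (spiralEnd m a (x, y)).2,
        ((spiral m a (x, y)).foldl wN (tri, num)).2) := by
  intro m
  induction m with
  | zero =>
      intro a tri x y num h
      rw [PySem.List.pyRange_one_eq_nil (by omega)]
      simp [spiral, spiralEnd]
  | succ m ih =>
      intro a tri x y num h
      rw [PySem.List.pyRange_one_cons (by omega)]
      simp only [List.foldl_cons]
      rw [A_leg (m + 1) (PySem.List.pyRange a n 1)
          (by rw [PySem.List.length_pyRange_one]; omega) a tri x y num]
      rw [ih (a + 1) _ _ _ _ (by omega)]
      simp only [spiral, spiralEnd, List.foldl_append]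

-- shape of the initial triangle
theorem tri0_len (N : Nat) :
    ((PySem.List.pyRange 1 ((N : Int) + 1) 1).map
        (fun j => (PySem.List.pyRange 0 j 1).map (fun _ => (0 : Int)))).map List.length =
      (List.range N).map (· + 1) := by
  rw [PySem.List.pyRange_one]
  rw [show ((N : Int) + 1 - 1).toNat = N by omega]
  simp only [List.map_map, Function.comp_def, List.length_map, PySem.List.length_pyRange_one]
  apply List.map_congr_left
  intro k _
  omega

-- a nested write with in-range indices, in List.set form, keeps the shape
theorem wN_step (T : List (List Int)) (c : Int) (q : Int × Int) (i j : Nat)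
    (hq1 : q.1 = (i : Int)) (hq2 : q.2 = (j : Int)) :
    wN (T, c) q = (T.set i ((T.getD i []).set j c), c + 1) := by
  simp only [wN, hq1, hq2, PySem.List.pyGetD_natCast, PySem.List.pySetD_natCast]

theorem shape_row (N : Nat) (T : List (List Int))
    (hlen : T.map List.length = (List.range N).map (· + 1)) (i : Nat) (hi : i < N) :
    (T.getD i []).length = i + 1 := by
  have hlT : T.length = N := by
    have := congrArg List.length hlen
    simpa using this
  have hi' : i < T.length := by omega
  rw [List.getD_eq_getElem T [] hi']
  have h1 : (T.map List.length)[i]'(by simpa [hlT]) = T[i].length := by simp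
  have h2 : (T.map List.length)[i]'(by simpa [hlT]) = i + 1 := by simp [hlen]
  omega

theorem shape_step (N : Nat) (T : List (List Int))
    (hlen : T.map List.length = (List.range N).map (· + 1)) (i j : Nat) (hi : i < N) (_hj : j ≤ i) (v : Int) :
    (T.set i ((T.getD i []).set j v)).map List.length = (List.range N).map (· + 1) := by
  have hrow := shape_row N T hlen i hi
  rw [List.map_set, hlen]
  have hval : ((T.getD i []).set j v).length = i + 1 := by
    rw [List.length_set]; exact hrow
  rw [hval]
  have hgi : ((List.range N).map (· + 1))[i]'(by simpa) = i + 1 := by simp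
  calc ((List.range N).map (· + 1)).set i (i + 1)
      = ((List.range N).map (· + 1)).set i (((List.range N).map (· + 1))[i]'(by simpa)) := by rw [hgi]
    _ = (List.range N).map (· + 1) := List.set_getElem_self (by simpa)

theorem ent_set_self (T : List (List Int)) (i j : Nat) (v : Int)
    (hi : i < T.length) (hj : j < (T.getD i []).length) :
    ent (T.set i ((T.getD i []).set j v)) i j = v := by
  unfold ent
  rw [List.getD_eq_getElem _ [] (by simpa using hi), List.getElem_set_self (by simpa using hi)]
  rw [List.getD_eq_getElem _ 0 (by simpa using hj), List.getElem_set_self (by simpa using hj)]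

theorem ent_set_ne (T : List (List Int)) (i j i' j' : Nat) (v : Int)
    (h : (i', j') ≠ (i, j)) :
    ent (T.set i ((T.getD i []).set j v)) i' j' = ent T i' j' := by
  unfold ent
  by_cases hii : i' = i
  · subst hii
    have hjj : j' ≠ j := fun hc => h (by rw [hc])
    by_cases hi : i' < T.length
    · rw [List.getD_eq_getElem _ [] (by simpa using hi), List.getElem_set_self (by simpa using hi)]
      by_cases hjr : j' < (T.getD i' []).length
      · rw [List.getD_eq_getElem _ 0 (by simpa using hjr),
            List.getElem_set_ne (fun hc => hjj hc.symm)]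
        rw [List.getD_eq_getElem _ 0 hjr]
      · rw [List.getD_eq_default _ _ (by rw [List.length_set]; omega),
            List.getD_eq_default _ _ (by omega)]
    · have hlen2 : (T.set i' ((T.getD i' []).set j v)).length = T.length := by simp
      have e1 : (T.set i' ((T.getD i' []).set j v)).getD i' [] = [] :=
        List.getD_eq_default _ _ (by omega)
      have e2 : T.getD i' [] = [] := List.getD_eq_default _ _ (by omega)
      rw [e1, e2]
  · by_cases hi' : i' < T.length
    · rw [List.getD_eq_getElem _ [] (by simpa using hi'),
          List.getElem_set_ne (fun hc => hii hc.symm)]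
      rw [List.getD_eq_getElem T [] hi']
    · have hlen2 : (T.set i ((T.getD i []).set j v)).length = T.length := by simp
      have e1 : (T.set i ((T.getD i []).set j v)).getD i' [] = [] :=
        List.getD_eq_default _ _ (by omega)
      have e2 : T.getD i' [] = [] := List.getD_eq_default _ _ (by omega)
      rw [e1, e2]

def InTri (N : Nat) (q : Int × Int) : Prop := 0 ≤ q.2 ∧ q.2 ≤ q.1 ∧ q.1 < (N : Int)

theorem fold_shape (N : Nat) : ∀ (qs : List (Int × Int)) (T : List (List Int)) (c : Int),
    T.map List.length = (List.range N).map (· + 1) → (∀ q ∈ qs, InTri N q) →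
    ((qs.foldl wN (T, c)).1).map List.length = (List.range N).map (· + 1) := by
  intro qs
  induction qs with
  | nil => intro T c hlen _; exact hlen
  | cons q qs ih =>
      intro T c hlen hq
      obtain ⟨h1, h2, h3⟩ := hq q List.mem_cons_self
      simp only [List.foldl_cons]
      rw [wN_step T c q q.1.toNat q.2.toNat (by omega) (by omega)]
      exact ih _ _ (shape_step N T hlen q.1.toNat q.2.toNat (by omega) (by omega) c)
        (fun p hp => hq p (List.mem_cons_of_mem q hp))

theorem fold_not_mem (N : Nat) : ∀ (qs : List (Int × Int)) (T : List (List Int)) (c : Int) (i j : Nat),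
    T.map List.length = (List.range N).map (· + 1) → (∀ q ∈ qs, InTri N q) →
    ((i : Int), (j : Int)) ∉ qs →
    ent ((qs.foldl wN (T, c)).1) i j = ent T i j := by
  intro qs
  induction qs with
  | nil => intro T c i j _ _ _; rfl
  | cons q qs ih =>
      intro T c i j hlen hq hnm
      obtain ⟨h1, h2, h3⟩ := hq q List.mem_cons_self
      simp only [List.foldl_cons]
      rw [wN_step T c q q.1.toNat q.2.toNat (by omega) (by omega)]
      rw [ih _ _ i j (shape_step N T hlen q.1.toNat q.2.toNat (by omega) (by omega) c)
          (fun p hp => hq p (List.mem_cons_of_mem q hp)) (fun hc => hnm (List.mem_cons_of_mem q hc))]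
      apply ent_set_ne
      intro hc
      apply hnm
      have e1 : q.1 = (i : Int) := by
        have := congrArg Prod.fst hc; simp at this; omega
      have e2 : q.2 = (j : Int) := by
        have := congrArg Prod.snd hc; simp at this; omega
      have e3 : ((i : Int), (j : Int)) = q := by
        rw [Prod.ext_iff]; exact ⟨e1.symm, e2.symm⟩
      rw [e3]
      exact List.mem_cons_self

theorem fold_at (N : Nat) : ∀ (qs : List (Int × Int)) (T : List (List Int)) (c : Int) (k i j : Nat),
    T.map List.length = (List.range N).map (· + 1) → (∀ q ∈ qs, InTri N q) →
    qs[k]? = some ((i : Int), (j : Int)) → qs.count ((i : Int), (j : Int)) = 1 →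
    ent ((qs.foldl wN (T, c)).1) i j = c + (k : Int) := by
  intro qs
  induction qs with
  | nil => intro T c k i j _ _ hk _; simp at hk
  | cons q qs ih =>
      intro T c k i j hlen hq hk hcnt
      obtain ⟨h1, h2, h3⟩ := hq q List.mem_cons_self
      have hlT : T.length = N := by
        have := congrArg List.length hlen; simpa using this
      simp only [List.foldl_cons]
      rw [wN_step T c q q.1.toNat q.2.toNat (by omega) (by omega)]
      have hsh := shape_step N T hlen q.1.toNat q.2.toNat (by omega) (by omega) c
      have htl := fun p hp => hq p (List.mem_cons_of_mem q hp)
      match k with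
      | 0 =>
          simp only [List.getElem?_cons_zero, Option.some.injEq] at hk
          subst hk
          have hnm : ((i : Int), (j : Int)) ∉ qs := by
            rw [← List.count_eq_zero]
            have h5 : ((((i : Int), (j : Int))) :: qs).count ((i : Int), (j : Int)) =
                qs.count ((i : Int), (j : Int)) + 1 := List.count_cons_self
            omega
          rw [fold_not_mem N qs _ (c + 1) i j hsh htl hnm]
          have e1 : ((i : Int), (j : Int)).1.toNat = i := by simp
          have e2 : ((i : Int), (j : Int)).2.toNat = j := by simp
          rw [e1, e2]
          rw [ent_set_self T i j c (by omega) (by rw [shape_row N T hlen i (by omega)]; omega)]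
          simp
      | k + 1 =>
          simp only [List.getElem?_cons_succ] at hk
          have hm : ((i : Int), (j : Int)) ∈ qs := List.mem_of_getElem? hk
          have hne : q ≠ ((i : Int), (j : Int)) := by
            intro hc
            have h5 : (q :: qs).count ((i : Int), (j : Int)) =
                qs.count ((i : Int), (j : Int)) + 1 := by
              rw [hc]; exact List.count_cons_self
            have h6 := List.count_pos_iff.mpr hm
            omega
          have hcnt' : qs.count ((i : Int), (j : Int)) = 1 := by
            have h5 : (q :: qs).count ((i : Int), (j : Int)) = qs.count ((i : Int), (j : Int)) :=
              List.count_cons_of_ne hne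
            omega
          rw [ih _ (c + 1) k i j hsh htl hk hcnt']
          push_cast
          ring

-- two triangles of the same shape with equal entries are equal
theorem tri_ext (N : Nat) (T T' : List (List Int))
    (h1 : T.map List.length = (List.range N).map (· + 1))
    (h2 : T'.map List.length = (List.range N).map (· + 1))
    (h : ∀ i j : Nat, i < N → j < i + 1 → ent T i j = ent T' i j) : T = T' := by
  have hT : T.length = N := by
    have := congrArg List.length h1; simpa using this
  have hT' : T'.length = N := by
    have := congrArg List.length h2; simpa using this
  apply List.ext_getElem (by omega)
  intro i hiT hiT'
  have hr : T[i].length = i + 1 := by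
    have := shape_row N T h1 i (by omega)
    rwa [List.getD_eq_getElem T [] hiT] at this
  have hr' : T'[i].length = i + 1 := by
    have := shape_row N T' h2 i (by omega)
    rwa [List.getD_eq_getElem T' [] hiT'] at this
  apply List.ext_getElem (by omega)
  intro j hj1 hj2
  have := h i j (by omega) (by omega)
  unfold ent at this
  rwa [List.getD_eq_getElem T [] hiT, List.getD_eq_getElem T' [] hiT',
       List.getD_eq_getElem _ 0 hj1, List.getD_eq_getElem _ 0 hj2] at this

-- B's rows
def rowsB (N : Nat) : List (List Int) :=
  (List.range N).map (fun i => (List.range (i + 1)).map (fun (j : Nat) => valB (N : Int) (i : Int) (j : Int)))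

theorem rowsB_shape (N : Nat) : (rowsB N).map List.length = (List.range N).map (· + 1) := by
  simp [rowsB]

theorem rowsB_ent (N i j : Nat) (hi : i < N) (hj : j < i + 1) :
    ent (rowsB N) i j = valB (N : Int) (i : Int) (j : Int) := by
  unfold ent rowsB
  have hrow : ((List.range N).map
        (fun i => (List.range (i + 1)).map (fun (j : Nat) => valB (N : Int) (i : Int) (j : Int)))).getD i []
      = (List.range (i + 1)).map (fun (j : Nat) => valB (N : Int) (i : Int) (j : Int)) := by
    rw [List.getD_eq_getElem?_getD, List.getElem?_map, List.getElem?_range hi]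
    simp only [Option.map_some, Option.getD_some]
  rw [hrow, List.getD_eq_getElem?_getD, List.getElem?_map, List.getElem?_range hj]
  simp only [Option.map_some, Option.getD_some]

theorem alt_eq_flatten (N : Nat) : solution_alt (N : Int) = (rowsB N).flatten := by
  unfold solution_alt rowsB
  rw [List.flatMap_def, PySem.List.pyRange_one, show ((N : Int) - 0).toNat = N by omega,
      List.map_map]
  congr 1
  apply List.map_congr_left
  intro k hk
  simp only [Function.comp_apply]
  rw [show (0 : Int) + (k : Int) = (k : Int) by ring]
  rw [PySem.List.pyRange_one, show ((k : Int) + 1 - 0).toNat = k + 1 by omega, List.map_map]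
  apply List.map_congr_left
  intro j hj
  simp only [Function.comp_apply]
  rw [show (0 : Int) + (j : Int) = (j : Int) by ring]

-- ===== VERDICT (by name: the statement is the Claim_ definition above) =====
theorem solution_spec : Claim_equal_solution := by
  intro n _
  unfold Spec_solution
  by_cases hn : 0 < n
  · obtain ⟨N, rfl⟩ : ∃ N : Nat, n = (N : Int) := ⟨n.toNat, by omega⟩
    rw [alt_eq_flatten]
    unfold solution
    dsimp only
    rw [A_outer ((N : Nat) : Int) N 0 _ (-1) 0 1 (by omega)]
    dsimp only
    apply congrArg List.flatten
    have hsp : ∀ q ∈ spiral N 0 (-1, 0), InTri N q := fun q hq => spiral_bounds N q hq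
    have hT0 := tri0_len N
    apply tri_ext N _ _ (fold_shape N _ _ _ hT0 hsp) (rowsB_shape N)
    intro i j hi hj
    rw [rowsB_ent N i j hi hj]
    obtain ⟨k, hk, hget⟩ := spiral_idx N (i : Int) (j : Int) (by omega) (by omega) (by omega)
    have hmem : ((i : Int), (j : Int)) ∈ spiral N 0 (-1, 0) := List.mem_of_getElem? hget
    have hcnt := List.count_eq_one_of_mem (spiral_nodup N) hmem
    rw [fold_at N _ _ 1 k i j hT0 hsp hget hcnt]
    omega
  · unfold solution solution_alt
    dsimp only
    rw [PySem.List.pyRange_one_eq_nil (show n ≤ 0 by omega)]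
    rw [PySem.List.pyRange_one_eq_nil (show n + 1 ≤ 1 by omega)]
    simp
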